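-- pv_equiv track=rewrite | github.com/parasiitism/AlgoDaily | glassdoor/amazon/count-squares-in-grid/main.py | countSquaresInGrid
-- ===== SOURCE A (Python) =====
-- def countSquaresInGrid(R, C):
--     res = 0
--     for i in range(R):
--         temp = 0
--         for j in range(C):
--             temp += min(R-i, C-j)
--         res += temp
--     return res
-- ===== SOURCE B (Python) =====
-- def countSquaresInGrid(R, C):
--     # single loop over the square size k: there are (R-k+1)*(C-k+1) k-by-k squares
--     res = 0
--     for k in range(1, min(R, C) + 1):
--         res += (R - k + 1) * (C - k + 1)
--     return res
-- ===== Notes on version B (the rewrite author's own statement) =====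
-- stated objective: faster
-- what changed: Replaces the nested R*C loop summing min(R-i,C-j) per cell by a single loop over the square size k, adding the count (R-k+1)*(C-k+1) of k-by-k squares directly.
import Mathlib
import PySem

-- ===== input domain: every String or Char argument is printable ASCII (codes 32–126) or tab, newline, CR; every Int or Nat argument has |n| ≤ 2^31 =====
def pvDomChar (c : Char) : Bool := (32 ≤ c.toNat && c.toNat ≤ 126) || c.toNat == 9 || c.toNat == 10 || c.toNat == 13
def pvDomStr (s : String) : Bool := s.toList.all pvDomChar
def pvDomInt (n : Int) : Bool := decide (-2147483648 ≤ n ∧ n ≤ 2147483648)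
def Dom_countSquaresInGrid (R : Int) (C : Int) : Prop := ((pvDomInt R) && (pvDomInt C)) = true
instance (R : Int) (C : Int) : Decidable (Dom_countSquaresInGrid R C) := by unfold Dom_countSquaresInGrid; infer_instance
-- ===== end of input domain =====

-- B replaces A's nested R*C loop (summing min(R-i,C-j) per cell) by a single
-- O(min(R,C)) loop adding (R-k+1)*(C-k+1) per square size k: asymptotically faster.

-- ===== PORT A =====
def countSquaresInGrid (R : Int) (C : Int) : Int :=
  (PySem.List.pyRange 0 R 1).foldl (fun res i =>
    res + (PySem.List.pyRange 0 C 1).foldl (fun temp j => temp + min (R - i) (C - j)) 0) 0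

-- ===== PORT B =====
def countSquaresInGrid_alt (R : Int) (C : Int) : Int :=
  (PySem.List.pyRange 1 (min R C + 1) 1).foldl (fun res k => res + (R - k + 1) * (C - k + 1)) 0

-- ===== PRECONDITION & SPEC =====
def Spec_countSquaresInGrid (R : Int) (C : Int) (out : Int) : Prop := out = countSquaresInGrid_alt R C
instance (R : Int) (C : Int) (out : Int) : Decidable (Spec_countSquaresInGrid R C out) := by unfold Spec_countSquaresInGrid; infer_instance

-- ===== CLAIM (what is proved, stated in full; the proofs are below) =====
def Claim_equal_countSquaresInGrid : Prop := ∀ (R : Int) (C : Int), Dom_countSquaresInGrid R C → Spec_countSquaresInGrid R C (countSquaresInGrid R C)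

-- ===== LEMMAS AND PROOFS =====

-- Port A as a double Finset sum over the loop indices.
lemma portA_sum (R C : Int) : countSquaresInGrid R C =
    ∑ i ∈ Finset.range R.toNat, ∑ j ∈ Finset.range C.toNat, min (R - i) (C - j) := by
  simp only [countSquaresInGrid, PySem.List.pyRange_one, sub_zero, List.foldl_map,
    PySem.List.foldl_add, zero_add]
  rfl

-- Port B as a single Finset sum over the loop index.
lemma portB_sum (R C : Int) : countSquaresInGrid_alt R C =
    ∑ k ∈ Finset.range (min R C).toNat, (R - (1 + k) + 1) * (C - (1 + k) + 1) := by
  simp only [countSquaresInGrid_alt, PySem.List.pyRange_one, add_sub_cancel_right,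
    List.foldl_map, PySem.List.foldl_add, zero_add]
  rfl

-- counting lemma: #{k < M : k < t} = t when t ≤ M
lemma count_lt (M t : Nat) (h : t ≤ M) :
    (∑ k ∈ Finset.range M, if k < t then 1 else 0) = t := by
  rw [← Finset.card_filter]
  have hf : (Finset.range M).filter (fun k => k < t) = Finset.range t := by
    ext x; simp; omega
  rw [hf, Finset.card_range]

-- counting lemma: #{x < m : k < m - x} = m - k (Nat subtraction)
lemma count_gt (m k : Nat) :
    (∑ x ∈ Finset.range m, if k < m - x then 1 else 0) = m - k := by
  rw [← Finset.card_filter]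
  have hf : (Finset.range m).filter (fun x => k < m - x) = Finset.range (m - k) := by
    ext x; simp; omega
  rw [hf, Finset.card_range]

-- the combinatorial core, in Nat: per-cell sums of min equal per-size counts of squares
lemma sq_count (n c : Nat) :
    (∑ i ∈ Finset.range n, ∑ j ∈ Finset.range c, min (n - i) (c - j)) =
    ∑ k ∈ Finset.range (min n c), (n - k) * (c - k) := by
  have expand : ∀ i ∈ Finset.range n, ∀ j ∈ Finset.range c,
      min (n - i) (c - j) =
        ∑ k ∈ Finset.range (min n c), if k < n - i ∧ k < c - j then 1 else 0 := by
    intro i hi j hj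
    simp only [Finset.mem_range] at hi hj
    have h1 : min (n - i) (c - j) ≤ min n c := by omega
    rw [← count_lt (min n c) (min (n - i) (c - j)) h1]
    exact Finset.sum_congr rfl fun k _ => if_congr lt_min_iff rfl rfl
  calc (∑ i ∈ Finset.range n, ∑ j ∈ Finset.range c, min (n - i) (c - j))
      = ∑ i ∈ Finset.range n, ∑ j ∈ Finset.range c,
          ∑ k ∈ Finset.range (min n c), if k < n - i ∧ k < c - j then 1 else 0 :=
        Finset.sum_congr rfl fun i hi => Finset.sum_congr rfl fun j hj => expand i hi j hj
    _ = ∑ i ∈ Finset.range n, ∑ k ∈ Finset.range (min n c),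
          ∑ j ∈ Finset.range c, if k < n - i ∧ k < c - j then 1 else 0 :=
        Finset.sum_congr rfl fun i _ => Finset.sum_comm
    _ = ∑ k ∈ Finset.range (min n c), ∑ i ∈ Finset.range n,
          ∑ j ∈ Finset.range c, if k < n - i ∧ k < c - j then 1 else 0 := Finset.sum_comm
    _ = ∑ k ∈ Finset.range (min n c), (n - k) * (c - k) := by
        apply Finset.sum_congr rfl
        intro k _
        have inner : ∀ i : Nat,
            (∑ j ∈ Finset.range c, if k < n - i ∧ k < c - j then 1 else 0)
              = if k < n - i then c - k else 0 := by
          intro i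
          by_cases hp : k < n - i
          · simp only [hp, true_and, if_true]
            exact count_gt c k
          · simp [hp]
        calc (∑ i ∈ Finset.range n, ∑ j ∈ Finset.range c,
                if k < n - i ∧ k < c - j then 1 else 0)
            = ∑ i ∈ Finset.range n, if k < n - i then c - k else 0 :=
              Finset.sum_congr rfl fun i _ => inner i
          _ = ∑ i ∈ Finset.range n, (if k < n - i then 1 else 0) * (c - k) := by
              apply Finset.sum_congr rfl; intro i _
              by_cases hp : k < n - i <;> simp [hp]
          _ = (∑ i ∈ Finset.range n, if k < n - i then 1 else 0) * (c - k) :=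
              (Finset.sum_mul ..).symm
          _ = (n - k) * (c - k) := by rw [count_gt]

-- the equality of the two ports, for all integer R and C
lemma ports_eq (R C : Int) : countSquaresInGrid R C = countSquaresInGrid_alt R C := by
  rw [portA_sum, portB_sum]
  rcases le_or_gt R 0 with hR | hR
  · have h1 : R.toNat = 0 := by omega
    have h2 : (min R C).toNat = 0 := by omega
    simp [h1, h2]
  rcases le_or_gt C 0 with hC | hC
  · have h1 : C.toNat = 0 := by omega
    have h2 : (min R C).toNat = 0 := by omega
    simp [h1, h2]
  · have hR' : ((R.toNat : Int)) = R := Int.toNat_of_nonneg hR.le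
    have hC' : ((C.toNat : Int)) = C := Int.toNat_of_nonneg hC.le
    have hm : (min R C).toNat = min R.toNat C.toNat := by omega
    rw [hm]
    have hA : (∑ i ∈ Finset.range R.toNat, ∑ j ∈ Finset.range C.toNat, min (R - i) (C - j))
        = ((∑ i ∈ Finset.range R.toNat, ∑ j ∈ Finset.range C.toNat,
            min (R.toNat - i) (C.toNat - j) : Nat) : Int) := by
      push_cast
      apply Finset.sum_congr rfl; intro i hi
      apply Finset.sum_congr rfl; intro j hj
      simp only [Finset.mem_range] at hi hj
      omega
    have hB : (∑ k ∈ Finset.range (min R.toNat C.toNat), (R - (1 + k) + 1) * (C - (1 + k) + 1))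
        = ((∑ k ∈ Finset.range (min R.toNat C.toNat),
            (R.toNat - k) * (C.toNat - k) : Nat) : Int) := by
      push_cast
      apply Finset.sum_congr rfl; intro k hk
      simp only [Finset.mem_range, lt_min_iff] at hk
      congr 1 <;> omega
    rw [hA, hB, sq_count]

-- ===== VERDICT (by name: the statement is the Claim_ definition above) =====
theorem countSquaresInGrid_spec : Claim_equal_countSquaresInGrid := by
  intro R C _
  unfold Spec_countSquaresInGrid
  exact ports_eq R C
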